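-- pv_equiv track=rewrite | github.com/Rosen-Popov/DataMining | 1/62150.py | gen_sol_state
-- ===== SOURCE A (Python) =====
-- def gen_sol_state(size, zer_pos):
--     result = []
--     for i in range(1,int(size+1)):
--         if i == zer_pos:
--             result.append(0)
--         result.append(i)
--     if 0 in result:
--         pass
--     else:
--         result.append(0)
--     return result
-- ===== SOURCE B (Python) =====
-- def gen_sol_state(size, zer_pos):
--     result = list(range(1, int(size + 1)))
--     if zer_pos in result:
--         result.insert(result.index(zer_pos), 0)
--     else:
--         result.append(0)
--     return result
-- ===== Notes on version B (the rewrite author's own statement) =====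
-- stated objective: simpler
-- what changed: Replaces A's single interleaving loop (append 0 inside the loop when i==zer_pos, plus a trailing '0 in result' scan) with a construct-then-insert decomposition: build range(1,size+1) once, then insert 0 at the index of zer_pos if present, else append it.
import Mathlib
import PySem

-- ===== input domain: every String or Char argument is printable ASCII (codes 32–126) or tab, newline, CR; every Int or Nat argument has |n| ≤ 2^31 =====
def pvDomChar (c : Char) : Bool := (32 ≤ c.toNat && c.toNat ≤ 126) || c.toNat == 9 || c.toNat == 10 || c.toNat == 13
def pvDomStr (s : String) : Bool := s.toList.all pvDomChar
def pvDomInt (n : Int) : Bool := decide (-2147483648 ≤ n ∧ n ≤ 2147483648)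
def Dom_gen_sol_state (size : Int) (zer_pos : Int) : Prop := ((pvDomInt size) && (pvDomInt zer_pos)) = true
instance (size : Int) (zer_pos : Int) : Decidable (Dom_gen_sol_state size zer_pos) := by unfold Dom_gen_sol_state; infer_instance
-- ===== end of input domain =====

-- B replaces A's interleaving loop with construct-then-insert (objective: simpler); return values proved equal.
-- ===== PORT A =====
-- the for-loop: per iteration, append 0 when i == zer_pos, then append i (emitted in order)
def pvLoopA (zer_pos : Int) : List Int → List Int
  | [] => []
  | i :: rest => (if i == zer_pos then [0] else []) ++ i :: pvLoopA zer_pos rest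

def gen_sol_state (size : Int) (zer_pos : Int) : List Int :=
  let result := pvLoopA zer_pos (PySem.List.pyRange 1 (size + 1) 1)
  if result.contains 0 then result else result ++ [0]

-- ===== PORT B =====
def gen_sol_state_alt (size : Int) (zer_pos : Int) : List Int :=
  let result := PySem.List.pyRange 1 (size + 1) 1
  match PySem.List.index? result zer_pos with
  | some k => PySem.List.insert result (k : Int) 0
  | none => result ++ [0]

-- ===== PRECONDITION & SPEC =====
def Spec_gen_sol_state (size : Int) (zer_pos : Int) (out : List Int) : Prop := out = gen_sol_state_alt size zer_pos
instance (size : Int) (zer_pos : Int) (out : List Int) : Decidable (Spec_gen_sol_state size zer_pos out) := by unfold Spec_gen_sol_state; infer_instance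

-- ===== CLAIM (what is proved, stated in full; the proofs are below) =====
def Claim_equal_gen_sol_state : Prop := ∀ (size : Int) (zer_pos : Int), Dom_gen_sol_state size zer_pos → Spec_gen_sol_state size zer_pos (gen_sol_state size zer_pos)

-- ===== LEMMAS AND PROOFS =====

-- A's loop emits (if i==z then [0,i] else [i]) per element
theorem pvLoopA_eq_flatMap (z : Int) (L : List Int) :
    pvLoopA z L = L.flatMap (fun i => if i = z then [0, i] else [i]) := by
  induction L with
  | nil => simp [pvLoopA]
  | cons x L ih =>
    by_cases hx : x = z <;> simp [pvLoopA, hx, ih]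

theorem pvFlatMap_id (z : Int) (L : List Int) (h : z ∉ L) :
    L.flatMap (fun i => if i = z then [0, i] else [i]) = L := by
  induction L with
  | nil => simp
  | cons x L ih =>
    simp only [List.mem_cons, not_or] at h
    rw [List.flatMap_cons, if_neg (fun hxz => h.1 hxz.symm), ih h.2]
    simp

theorem pvCore (z : Int) (L : List Int) (h0 : (0 : Int) ∉ L) (hnd : L.Nodup) :
    (let result := L.flatMap (fun i => if i = z then [0, i] else [i]);
      if result.contains 0 then result else result ++ [0])
      = (match PySem.List.index? L z with
         | some k => PySem.List.insert L (k : Int) 0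
         | none => L ++ [0]) := by
  by_cases hz : z ∈ L
  · obtain ⟨k, hk⟩ : ∃ k, PySem.List.index? L z = some k := by
      have := (PySem.List.index?_isSome_iff L z).2 hz
      exact Option.isSome_iff_exists.mp this
    obtain ⟨pre, suf, hL, hlen, hpre⟩ := (PySem.List.index?_eq_some_iff L z k).1 hk
    have hzsuf : z ∉ suf := by
      subst hL
      exact (List.nodup_cons.1 (List.nodup_append.1 hnd).2.1).1
    have hflat : L.flatMap (fun i => if i = z then [0, i] else [i])
        = pre ++ 0 :: z :: suf := by
      rw [hL, List.flatMap_append, pvFlatMap_id z pre hpre, List.flatMap_cons,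
        pvFlatMap_id z suf hzsuf]
      simp
    have hklen : k ≤ L.length := by
      rw [hL, List.length_append, ← hlen]; simp
    have htake : L.take k = pre := by rw [hL, ← hlen, List.take_left]
    have hdrop : L.drop k = z :: suf := by rw [hL, ← hlen, List.drop_left]
    have hcon : ((pre ++ 0 :: z :: suf).contains (0:Int)) = true := by simp
    simp only [hk, hflat, hcon, if_true]
    rw [PySem.List.insert_natCast L k 0 hklen, htake, hdrop]
  · have hi : PySem.List.index? L z = none := (PySem.List.index?_eq_none_iff L z).2 hz
    have hflat := pvFlatMap_id z L hz
    simp only [hflat, hi]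
    have : (L.contains (0:Int)) = false := by
      simp [List.contains_eq_mem, h0]
    simp [h0]


-- ===== VERDICT (by name: the statement is the Claim_ definition above) =====
theorem gen_sol_state_spec : Claim_equal_gen_sol_state := by
  intro size zer_pos _
  unfold Spec_gen_sol_state gen_sol_state gen_sol_state_alt
  rw [pvLoopA_eq_flatMap]
  exact pvCore zer_pos (PySem.List.pyRange 1 (size + 1) 1)
    (fun hm => by have := (PySem.List.mem_pyRange_one).1 hm; omega)
    (PySem.List.nodup_pyRange_one 1 (size + 1))
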